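-- pv_equiv track=rewrite | github.com/jsbaekx/jsbaekx | 컴퓨터프로그래밍입문/HW13/gene.py | find_gene_sequence
-- ===== SOURCE A (Python) =====
-- def find_gene_sequence(genome, starting_markers, ending_markers):
--     shortest_gene = None
--
--     # 모든 starting marker와 ending marker를 순차적으로 검사
--     for start in starting_markers:
--         for end in ending_markers:
--             start_len = len(start)
--             end_len = len(end)
--
--             # genome에서 시작 마커가 존재하는 위치를 찾기
--             start_pos = 0
--             while start_pos < len(genome):
--                 start_pos = genome.find(start, start_pos)
--                 if start_pos == -1:
--                     break  # 더 이상 찾을 수 없으면 종료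
--
--                 # 시작 마커가 발견되었을 때 종료 마커를 찾기
--                 end_pos = genome.find(end, start_pos + start_len)
--                 while end_pos != -1:
--                     # 유전자 조건을 만족하는지 체크
--                     gene_candidate = genome[start_pos:end_pos + end_len]
--
--                     # 조건을 만족하면 가장 짧고 사전식 순으로 가장 빠른 유전자 선택
--                     if shortest_gene is None or (len(gene_candidate) < len(shortest_gene)) or \
--                             (len(gene_candidate) == len(shortest_gene) and gene_candidate < shortest_gene):
--                         shortest_gene = gene_candidate
--
--                     # 끝 마커 이후로 다시 찾기
--                     end_pos = genome.find(end, end_pos + 1)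
--
--                 # 시작 마커 이후로 다시 찾기
--                 start_pos = start_pos + 1
--
--     return shortest_gene
-- ===== SOURCE B (Python) =====
-- def find_gene_sequence(genome, starting_markers, ending_markers):
--     # One pass over start-marker occurrences; for each, only the NEAREST following
--     # occurrence of each end marker is considered (later ones give strictly longer
--     # candidates, which can never win), removing A's inner scan over all end positions.
--     n = len(genome)
--     best = None
--     for start in starting_markers:
--         pos = genome.find(start)
--         while 0 <= pos < n:
--             for end in ending_markers:
--                 e = genome.find(end, pos + len(start))
--                 if e != -1:
--                     cand = genome[pos:e + len(end)]
--                     if best is None or (len(cand), cand) < (len(best), best):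
--                         best = cand
--             pos = genome.find(start, pos + 1)
--     return best
-- ===== Notes on version B (the rewrite author's own statement) =====
-- stated objective: faster
-- what changed: For each start-marker occurrence B probes only the nearest following occurrence of each end marker (a single find per pair) instead of A's inner while-loop over every later end occurrence, since later occurrences only yield strictly longer candidates that can never beat the nearest one.
import Mathlib
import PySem

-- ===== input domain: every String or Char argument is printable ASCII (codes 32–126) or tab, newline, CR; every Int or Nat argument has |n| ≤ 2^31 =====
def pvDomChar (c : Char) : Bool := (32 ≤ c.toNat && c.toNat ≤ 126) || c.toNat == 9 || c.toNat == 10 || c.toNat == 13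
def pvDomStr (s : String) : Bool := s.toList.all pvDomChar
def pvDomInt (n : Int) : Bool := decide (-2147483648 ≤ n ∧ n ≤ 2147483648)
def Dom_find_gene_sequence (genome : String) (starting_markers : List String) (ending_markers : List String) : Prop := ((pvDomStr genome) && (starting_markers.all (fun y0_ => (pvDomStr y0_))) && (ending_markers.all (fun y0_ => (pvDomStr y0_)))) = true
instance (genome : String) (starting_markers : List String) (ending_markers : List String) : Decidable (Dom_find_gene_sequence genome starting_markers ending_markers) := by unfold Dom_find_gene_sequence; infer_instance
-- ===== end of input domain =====

-- B replaces A's inner scan over ALL end-marker occurrences by a single find of the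
-- nearest one per start occurrence (later occurrences are strictly longer candidates
-- and can never win); measured asymptotically faster.

-- ===== PORT A =====

-- shortest_gene update: `if shortest_gene is None or len(c) < len(s) or (len(c) == len(s) and c < s)`
def pvUpdA (best : Option (List Char)) (cand : List Char) : Option (List Char) :=
  match best with
  | none => some cand
  | some b =>
    if cand.length < b.length ∨ (cand.length = b.length ∧ cand < b) then some cand else some b

-- inner `while end_pos != -1` loop (fuel-bounded; g.length + 1 fuel is always enough)
def pvEndLoopA (g en : List Char) (sp ep : Int) (best : Option (List Char)) (fuel : Nat) :
    Option (List Char) :=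
  match fuel with
  | 0 => best
  | f + 1 =>
    if ep = -1 then best
    else
      pvEndLoopA g en sp (PySem.Chars.findFrom g en (ep + 1))
        (pvUpdA best (PySem.List.slice g (some sp) (some (ep + (en.length : Int))))) f

-- outer `while start_pos < len(genome)` loop
def pvStartLoopA (g st en : List Char) (sp : Int) (best : Option (List Char)) (fuel : Nat) :
    Option (List Char) :=
  match fuel with
  | 0 => best
  | f + 1 =>
    if sp < (g.length : Int) then
      let q := PySem.Chars.findFrom g st sp
      if q = -1 then best
      else
        pvStartLoopA g st en (q + 1)
          (pvEndLoopA g en q (PySem.Chars.findFrom g en (q + (st.length : Int))) best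
            (g.length + 1)) f
    else best

def find_gene_sequence (genome : String) (starting_markers : List String)
    (ending_markers : List String) : Option String :=
  let g := genome.toList
  (starting_markers.foldl
      (fun best st =>
        ending_markers.foldl
          (fun best en => pvStartLoopA g st.toList en.toList 0 best (g.length + 1)) best)
      none).map String.mk

-- ===== PORT B =====

-- `(len(cand), cand) < (len(best), best)` tuple comparison (None is always beaten)
def pvBetter (cand : List Char) (best : Option (List Char)) : Bool :=
  match best with
  | none => true
  | some b => cand.length < b.length || (cand.length == b.length && PySem.Chars.strLt cand b)

-- body of B's `for end in ending_markers` loop at one start occurrence `pos`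
def pvStepB (g : List Char) (stLen : Nat) (pos : Int) (best : Option (List Char))
    (en : List Char) : Option (List Char) :=
  let e := PySem.Chars.findFrom g en (pos + (stLen : Int))
  if e ≠ -1 then
    let cand := PySem.List.slice g (some pos) (some (e + (en.length : Int)))
    if pvBetter cand best then some cand else best
  else best

-- B's `while 0 <= pos < n` loop (fuel-bounded; g.length + 1 fuel is always enough)
def pvPosLoopB (g st : List Char) (ends : List (List Char)) (pos : Int)
    (best : Option (List Char)) (fuel : Nat) : Option (List Char) :=
  match fuel with
  | 0 => best
  | f + 1 =>
    if 0 ≤ pos ∧ pos < (g.length : Int) then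
      pvPosLoopB g st ends (PySem.Chars.findFrom g st (pos + 1))
        (ends.foldl (fun best en => pvStepB g st.length pos best en) best) f
    else best

def find_gene_sequence_alt (genome : String) (starting_markers : List String)
    (ending_markers : List String) : Option String :=
  let g := genome.toList
  let ends := ending_markers.map String.toList
  (starting_markers.foldl
      (fun best st =>
        pvPosLoopB g st.toList ends (PySem.Chars.find g st.toList) best (g.length + 1))
      none).map String.mk

-- ===== PRECONDITION & SPEC =====
def Spec_find_gene_sequence (genome : String) (starting_markers : List String) (ending_markers : List String) (out : Option String) : Prop := out = find_gene_sequence_alt genome starting_markers ending_markers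
instance (genome : String) (starting_markers : List String) (ending_markers : List String) (out : Option String) : Decidable (Spec_find_gene_sequence genome starting_markers ending_markers out) := by unfold Spec_find_gene_sequence; infer_instance

-- ===== CLAIM (what is proved, stated in full; the proofs are below) =====
def Claim_equal_find_gene_sequence : Prop := ∀ (genome : String) (starting_markers : List String) (ending_markers : List String), Dom_find_gene_sequence genome starting_markers ending_markers → Spec_find_gene_sequence genome starting_markers ending_markers (find_gene_sequence genome starting_markers ending_markers)

-- ===== LEMMAS AND PROOFS =====

-- `pvUpdA` is a min for the strict "better" relation pvP c b := shorter-or-(equal-and-lex-smaller).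

abbrev pvP (a b : List Char) : Prop := a.length < b.length ∨ (a.length = b.length ∧ a < b)

theorem pvUpdA_some (b c : List Char) :
    pvUpdA (some b) c = if pvP c b then some c else some b := rfl

theorem pvP_trans {a b c : List Char} (h1 : pvP a b) (h2 : pvP b c) : pvP a c := by
  rcases h1 with h1 | ⟨h1, h1'⟩ <;> rcases h2 with h2 | ⟨h2, h2'⟩
  · exact Or.inl (h1.trans h2)
  · exact Or.inl (h2 ▸ h1)
  · exact Or.inl (h1 ▸ h2)
  · exact Or.inr ⟨h1.trans h2, lt_trans h1' h2'⟩

theorem pvP_asymm {a b : List Char} (h1 : pvP a b) (h2 : pvP b a) : False := by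
  rcases h1 with h1 | ⟨h1, h1'⟩ <;> rcases h2 with h2 | ⟨h2, h2'⟩
  · omega
  · omega
  · omega
  · exact absurd (lt_trans h1' h2') (lt_irrefl a)

theorem pvP_eq {a b : List Char} (h1 : ¬ pvP a b) (h2 : ¬ pvP b a) : a = b := by
  unfold pvP at h1 h2
  push_neg at h1 h2
  have hlen : a.length = b.length := by omega
  exact le_antisymm (h2.2 hlen.symm) (h1.2 hlen)

theorem pvUpdA_some_comm (b c d : List Char) :
    pvUpdA (pvUpdA (some b) c) d = pvUpdA (pvUpdA (some b) d) c := by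
  rw [pvUpdA_some b c, pvUpdA_some b d]
  by_cases hcb : pvP c b <;> by_cases hdb : pvP d b
  · rw [if_pos hcb, if_pos hdb, pvUpdA_some c d, pvUpdA_some d c]
    by_cases hdc : pvP d c
    · rw [if_pos hdc, if_neg (fun h => pvP_asymm h hdc)]
    · by_cases hcd : pvP c d
      · rw [if_neg hdc, if_pos hcd]
      · rw [if_neg hdc, if_neg hcd, pvP_eq hcd hdc]
  · rw [if_pos hcb, if_neg hdb, pvUpdA_some c d, pvUpdA_some b c,
      if_neg (fun h => hdb (pvP_trans h hcb)), if_pos hcb]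
  · rw [if_neg hcb, if_pos hdb, pvUpdA_some b d, pvUpdA_some d c,
      if_pos hdb, if_neg (fun h => hcb (pvP_trans h hdb))]
  · rw [if_neg hcb, if_neg hdb, pvUpdA_some b d, pvUpdA_some b c, if_neg hdb, if_neg hcb]

theorem pvUpdA_comm (b : Option (List Char)) (c d : List Char) :
    pvUpdA (pvUpdA b c) d = pvUpdA (pvUpdA b d) c := by
  rcases b with _ | b
  · show pvUpdA (some c) d = pvUpdA (some d) c
    rw [pvUpdA_some c d, pvUpdA_some d c]
    by_cases hdc : pvP d c
    · rw [if_pos hdc, if_neg (fun h => pvP_asymm h hdc)]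
    · by_cases hcd : pvP c d
      · rw [if_neg hdc, if_pos hcd]
      · rw [if_neg hdc, if_neg hcd, pvP_eq hcd hdc]
  · exact pvUpdA_some_comm b c d

theorem pvBetter_eq_decide (b c : List Char) : pvBetter c (some b) = decide (pvP c b) := by
  by_cases h : pvP c b
  · rcases h with h | ⟨h1, h2⟩ <;>
      simp [pvBetter, PySem.Chars.strLt, pvP, *]
  · have h1 : ¬ c.length < b.length := fun hh => h (Or.inl hh)
    by_cases he : c.length = b.length
    · have h2 : ¬ c < b := fun hlt => h (Or.inr ⟨he, hlt⟩)
      simp [pvBetter, PySem.Chars.strLt, pvP, h1, he, h2]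
    · simp [pvBetter, PySem.Chars.strLt, pvP, h1, he]

theorem pvBetter_updA (b : Option (List Char)) (c : List Char) :
    (if pvBetter c b then some c else b) = pvUpdA b c := by
  rcases b with _ | b
  · rfl
  · rw [pvBetter_eq_decide, pvUpdA_some]
    by_cases h : pvP c b <;> simp [h]

theorem pvStepB_eq (g : List Char) (stLen : Nat) (pos : Int) (b : Option (List Char))
    (en : List Char) :
    pvStepB g stLen pos b en =
      (if PySem.Chars.findFrom g en (pos + (stLen : Int)) = -1 then b
       else pvUpdA b (PySem.List.slice g (some pos)
              (some (PySem.Chars.findFrom g en (pos + (stLen : Int)) + (en.length : Int))))) := by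
  by_cases h : PySem.Chars.findFrom g en (pos + (stLen : Int)) = -1
  · rw [if_pos h]
    simp only [pvStepB]
    rw [if_neg (fun hne => hne h)]
  · rw [if_neg h]
    simp only [pvStepB]
    rw [if_pos h]
    exact pvBetter_updA b _

-- Commuting any pvUpdA through the loops.

theorem pvEndLoopA_updA (g en : List Char) (sp : Int) :
    ∀ (fuel : Nat) (ep : Int) (b : Option (List Char)) (c : List Char),
      pvEndLoopA g en sp ep (pvUpdA b c) fuel = pvUpdA (pvEndLoopA g en sp ep b fuel) c := by
  intro fuel
  induction fuel with
  | zero => intro ep b c; rfl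
  | succ f ih =>
    intro ep b c
    simp only [pvEndLoopA]
    split_ifs with h
    · rfl
    · rw [pvUpdA_comm, ih]

theorem pvStartLoopA_updA (g st en : List Char) :
    ∀ (fuel : Nat) (sp : Int) (b : Option (List Char)) (c : List Char),
      pvStartLoopA g st en sp (pvUpdA b c) fuel = pvUpdA (pvStartLoopA g st en sp b fuel) c := by
  intro fuel
  induction fuel with
  | zero => intro sp b c; rfl
  | succ f ih =>
    intro sp b c
    simp only [pvStartLoopA]
    split_ifs with h1 h2
    · rfl
    · rw [pvEndLoopA_updA, ih]
    · rfl

theorem pvStartLoopA_stepB (g st en' : List Char) (fuel : Nat) (sp : Int)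
    (stLen : Nat) (pos : Int) (en : List Char) (b : Option (List Char)) :
    pvStartLoopA g st en' sp (pvStepB g stLen pos b en) fuel =
      pvStepB g stLen pos (pvStartLoopA g st en' sp b fuel) en := by
  rw [pvStepB_eq, pvStepB_eq]
  split_ifs with h
  · rfl
  · exact pvStartLoopA_updA g st en' fuel sp b _

-- generic fold exchange for commuting step families
theorem pvPull {β τ : Type} (F : τ → β → β) (h : β → β)
    (hc : ∀ x b, F x (h b) = h (F x b)) :
    ∀ (xs : List τ) (b : β),
      xs.foldl (fun b x => F x b) (h b) = h (xs.foldl (fun b x => F x b) b) := by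
  intro xs
  induction xs with
  | nil => intro b; rfl
  | cons x xs ih => intro b; simp only [List.foldl_cons, hc, ih]

theorem pvInterleave {β τ : Type} (F G : τ → β → β)
    (hc : ∀ x y b, F x (G y b) = G y (F x b)) :
    ∀ (xs : List τ) (b : β),
      xs.foldl (fun b x => F x (G x b)) b =
        xs.foldl (fun b x => F x b) (xs.foldl (fun b x => G x b) b) := by
  intro xs
  induction xs with
  | nil => intro b; rfl
  | cons x xs ih =>
    intro b
    simp only [List.foldl_cons]
    rw [ih, pvPull (fun y b => G y b) (F x) (fun y b => (hc x y b).symm)]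

theorem pvFoldlConst {β τ : Type} (xs : List τ) (b : β) :
    xs.foldl (fun b _ => b) b = b := by
  induction xs with
  | nil => rfl
  | cons x xs ih => simpa using ih

-- findFrom facts
theorem pvFindFrom_of_len_lt (g sub : List Char) (k : Int) (h : (g.length : Int) < k) :
    PySem.Chars.findFrom g sub k = -1 := by
  simp only [PySem.Chars.findFrom]
  have h0 : ¬ k < 0 := by omega
  rw [if_neg h0, if_pos (by omega)]

theorem pvFindFrom_next (g en : List Char) (j : Int) (hj : 0 ≤ j) :
    PySem.Chars.findFrom g en j = -1 ∨
      (j ≤ PySem.Chars.findFrom g en j ∧ PySem.Chars.findFrom g en j ≤ (g.length : Int) ∧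
        en <+: g.drop (PySem.Chars.findFrom g en j).toNat) := by
  by_cases hlen : j ≤ (g.length : Int)
  · have hj' : j = ((j.toNat : Nat) : Int) := by omega
    have hle : j.toNat ≤ g.length := by omega
    by_cases hneg : PySem.Chars.findFrom g en j = -1
    · exact Or.inl hneg
    · rw [hj'] at hneg ⊢
      obtain ⟨h1, h2, _⟩ := PySem.Chars.findFrom_natCast_spec g en j.toNat hle hneg
      refine Or.inr ⟨h1, ?_, h2⟩
      have hfind : ¬ PySem.Chars.find (g.drop j.toNat) en = -1 := by
        intro hf
        rw [PySem.Chars.findFrom_natCast g en j.toNat hle, if_pos hf] at hneg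
        exact hneg rfl
      rw [PySem.Chars.findFrom_natCast g en j.toNat hle, if_neg hfind]
      have := PySem.Chars.find_le_length (g.drop j.toNat) en
      simp only [List.length_drop] at this
      omega
  · exact Or.inl (pvFindFrom_of_len_lt g en j (by omega))

-- candidate length: slice g [q, e+|en|) has length e.toNat + |en| - q.toNat
theorem pvSlice_len (g en : List Char) (q e : Int) (hq : 0 ≤ q) (hqlen : q.toNat ≤ g.length)
    (he : 0 ≤ e) (helen : e ≤ (g.length : Int)) (hocc : en <+: g.drop e.toNat) :
    (PySem.List.slice g (some q) (some (e + (en.length : Int)))).length =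
      e.toNat + en.length - q.toNat := by
  have hfit : e.toNat + en.length ≤ g.length := by
    have := hocc.length_le
    simp only [List.length_drop] at this
    omega
  have h1 : q = ((q.toNat : Nat) : Int) := by omega
  have h2 : e + (en.length : Int) = (((e.toNat + en.length : Nat)) : Int) := by omega
  rw [h1, h2, PySem.List.length_slice, PySem.List.clampIdx_natCast, PySem.List.clampIdx_natCast]
  omega

-- once the best is at most as long as every remaining candidate can be, the end loop is a no-op
theorem pvEndLoopA_noop (g en : List Char) (q : Int) (b : List Char)
    (hq : 0 ≤ q) (hqlen : q.toNat ≤ g.length) :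
    ∀ (fuel : Nat) (ep : Int),
      (ep = -1 ∨ (0 ≤ ep ∧ ep ≤ (g.length : Int) ∧ en <+: g.drop ep.toNat ∧
        (b.length : Int) + q < ep + en.length)) →
      pvEndLoopA g en q ep (some b) fuel = some b := by
  intro fuel
  induction fuel with
  | zero => intro ep _; rfl
  | succ f ih =>
    intro ep hep
    simp only [pvEndLoopA]
    split_ifs with h
    · rfl
    · rcases hep with hep | ⟨he0, helen, hocc, hlt⟩
      · exact absurd hep h
      · have hclen : (PySem.List.slice g (some q) (some (ep + (en.length : Int)))).length =
            ep.toNat + en.length - q.toNat := pvSlice_len g en q ep hq hqlen he0 helen hocc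
        have hkeep : pvUpdA (some b)
            (PySem.List.slice g (some q) (some (ep + (en.length : Int)))) = some b := by
          rw [pvUpdA_some, if_neg]
          intro hcon
          rcases hcon with hcon | ⟨hcon, _⟩ <;> rw [hclen] at hcon <;> omega
        rw [hkeep]
        apply ih
        rcases pvFindFrom_next g en (ep + 1) (by omega) with hn | ⟨hge, hle, hocc'⟩
        · exact Or.inl hn
        · exact Or.inr ⟨by omega, hle, hocc', by omega⟩

-- A's whole end loop equals B's single nearest-end step
theorem pvEndLoopA_eq_stepB (g st en : List Char) (q : Int)
    (hq : 0 ≤ q) (hqlen0 : q.toNat ≤ g.length) (hocc : st <+: g.drop q.toNat) :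
    ∀ b, pvEndLoopA g en q (PySem.Chars.findFrom g en (q + (st.length : Int))) b
          (g.length + 1) = pvStepB g st.length q b en := by
  intro b
  have hqfit : q.toNat + st.length ≤ g.length := by
    have := hocc.length_le
    simp only [List.length_drop] at this
    omega
  rw [pvStepB_eq]
  set e := PySem.Chars.findFrom g en (q + (st.length : Int)) with hedef
  split_ifs with h
  · simp only [pvEndLoopA, h, if_pos]
  · rcases pvFindFrom_next g en (q + (st.length : Int)) (by omega) with hn | ⟨hge, hle, hocc'⟩
    · exact absurd hn h
    · have he0 : 0 ≤ e := le_trans (by omega) hge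
      have hqlen : q.toNat ≤ g.length := by omega
      have hclen : (PySem.List.slice g (some q) (some (e + (en.length : Int)))).length =
          e.toNat + en.length - q.toNat := pvSlice_len g en q e hq hqlen he0 hle hocc'
      show pvEndLoopA g en q e b (g.length + 1) = _
      simp only [pvEndLoopA, if_neg h]
      set c := PySem.List.slice g (some q) (some (e + (en.length : Int))) with hcdef
      have hb1 : ∃ b1, pvUpdA b c = some b1 ∧ b1.length ≤ c.length := by
        rcases b with _ | b0
        · exact ⟨c, rfl, le_refl _⟩
        · rw [pvUpdA_some]
          split_ifs with hP
          · exact ⟨c, rfl, le_refl _⟩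
          · refine ⟨b0, rfl, ?_⟩
            rcases Nat.lt_or_ge c.length b0.length with hh | hh
            · exact absurd (Or.inl hh) hP
            · exact hh
      obtain ⟨b1, hb1eq, hb1len⟩ := hb1
      rw [hb1eq]
      apply pvEndLoopA_noop g en q b1 hq hqlen
      rcases pvFindFrom_next g en (e + 1) (by omega) with hn | ⟨hge', hle', hocc''⟩
      · exact Or.inl hn
      · refine Or.inr ⟨by omega, hle', hocc'', ?_⟩
        rw [hclen] at hb1len
        have hfit : e.toNat + en.length ≤ g.length := by
          have := hocc'.length_le
          simp only [List.length_drop] at this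
          omega
        omega

-- main loop correspondence: A's (start,end)-major scan, folded over all end markers,
-- equals B's position-major scan
theorem pvMain (g st : List Char) (ends : List (List Char)) :
    ∀ (fuel : Nat) (k : Int) (b : Option (List Char)),
      0 ≤ k → k ≤ (g.length : Int) → (g.length : Int) - k < (fuel : Int) →
      ends.foldl (fun b en => pvStartLoopA g st en k b fuel) b =
        pvPosLoopB g st ends (PySem.Chars.findFrom g st k) b fuel := by
  intro fuel
  induction fuel with
  | zero =>
    intro k b hk0 hklen hfuel
    exfalso
    simp only [Nat.cast_zero] at hfuel
    omega
  | succ f ih =>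
    intro k b hk0 hklen hfuel
    by_cases hk : k < (g.length : Int)
    · set q := PySem.Chars.findFrom g st k with hqdef
      by_cases hq : q = -1
      · have hstop : ∀ en b, pvStartLoopA g st en k b (f + 1) = b := by
          intro en b
          simp only [pvStartLoopA, if_pos hk, ← hqdef, hq, reduceIte]
        simp only [hstop]
        rw [pvFoldlConst]
        simp only [pvPosLoopB, ← hqdef, hq]
        rw [if_neg (by omega)]
      · rcases pvFindFrom_next g st k hk0 with hn | ⟨hge, hle, hocc⟩
        · exact absurd hn hq
        · have hq0 : 0 ≤ q := le_trans hk0 hge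
          have hqlt : q < (g.length : Int) := by
            have hqle : k = ((k.toNat : Nat) : Int) := by omega
            rcases List.eq_nil_or_concat st with hst | ⟨_, _, hst⟩
            · rw [hqdef, hqle, PySem.Chars.findFrom_natCast g st k.toNat (by omega), hst]
              simp only [PySem.Chars.find_nil]
              rw [if_neg (by omega)]
              omega
            · have hlen1 : 1 ≤ st.length := by rw [hst]; simp
              have := hocc.length_le
              simp only [List.length_drop] at this
              omega
          have hunf : ∀ en b, pvStartLoopA g st en k b (f + 1) =
              pvStartLoopA g st en (q + 1)
                (pvEndLoopA g en q (PySem.Chars.findFrom g en (q + (st.length : Int))) b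
                  (g.length + 1)) f := by
            intro en b
            simp only [pvStartLoopA, if_pos hk, ← hqdef, hq, reduceIte]
          have hcol : ∀ (en : List Char) (b : Option (List Char)),
              pvEndLoopA g en q (PySem.Chars.findFrom g en (q + (st.length : Int))) b
                (g.length + 1) = pvStepB g st.length q b en :=
            fun en b => pvEndLoopA_eq_stepB g st en q hq0 (by omega)
              (by rw [hqdef]; exact hocc) b
          simp only [hunf, hcol]
          rw [pvInterleave (fun en b => pvStartLoopA g st en (q + 1) b f)
                (fun en b => pvStepB g st.length q b en)
                (fun x y b => pvStartLoopA_stepB g st x f (q + 1) st.length q y b)]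
          rw [ih (q + 1) _ (by omega) (by omega) (by push_cast at hfuel ⊢; omega)]
          simp only [pvPosLoopB, ← hqdef]
          rw [if_pos ⟨hq0, hqlt⟩]
    · -- k = g.length: no iteration on either side
      have hstop : ∀ en b, pvStartLoopA g st en k b (f + 1) = b := by
        intro en b
        simp only [pvStartLoopA]
        rw [if_neg (by omega)]
      simp only [hstop]
      rw [pvFoldlConst]
      simp only [pvPosLoopB]
      rw [if_neg]
      by_cases hq : PySem.Chars.findFrom g st k = -1
      · rw [hq]; omega
      · rcases pvFindFrom_next g st k hk0 with hn | ⟨hge, _, _⟩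
        · exact absurd hn hq
        · omega

theorem pvTop (g : List Char) (starts ends : List String) :
    ∀ b, starts.foldl
        (fun best st =>
          ends.foldl (fun best en => pvStartLoopA g st.toList en.toList 0 best (g.length + 1))
            best) b =
      starts.foldl
        (fun best st =>
          pvPosLoopB g st.toList (ends.map String.toList) (PySem.Chars.find g st.toList) best
            (g.length + 1)) b := by
  induction starts with
  | nil => intro b; rfl
  | cons st starts ih =>
    intro b
    simp only [List.foldl_cons]
    rw [← List.foldl_map
        (f := String.toList)
        (g := fun best en => pvStartLoopA g st.toList en 0 best (g.length + 1)),
      ← PySem.Chars.findFrom_zero g st.toList,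
      pvMain g st.toList (ends.map String.toList) (g.length + 1) 0 b (by omega) (by omega)
        (by push_cast; omega)]
    exact ih _

-- ===== VERDICT (by name: the statement is the Claim_ definition above) =====
theorem find_gene_sequence_spec : Claim_equal_find_gene_sequence := by
  unfold Claim_equal_find_gene_sequence Spec_find_gene_sequence
  intro genome starts ends _
  unfold find_gene_sequence find_gene_sequence_alt
  exact congrArg (fun o => Option.map String.mk o) (pvTop genome.toList starts ends none)
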